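-- pv_equiv track=rewrite | github.com/kmfahey/leet_code_submissions | hackerrank/one-month-preparation-kit/10_two_arrays.py | twoArrays
-- ===== SOURCE A (Python) =====
-- def twoArrays(k, A, B):
--     A = sorted(A)
--     B = sorted(B)
--     satisfiable = True
--     while len(A):
--         elem = A.pop(0)
--         for index in range(len(B)):
--             if elem + B[index] >= k:
--                 B.pop(index)
--                 satisfiable = True
--                 break
--             satisfiable = False
--         if not satisfiable:
--             break
--     return "YES" if satisfiable else "NO"
-- ===== SOURCE B (Python) =====
-- def twoArrays(k, A, B):
--     A2 = sorted(A)
--     B2 = sorted(B)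
--     return "YES" if all(a + b >= k for a, b in zip(A2, reversed(B2))) else "NO"
-- ===== Notes on version B (the rewrite author's own statement) =====
-- stated objective: simpler
-- what changed: Replaces the stateful greedy loop (pop smallest a, scan-and-remove the first usable b, stale-flag handling) by the classic direct pairing check: sort A ascending, pair with B sorted descending, verify every pair sums to at least k.
import Mathlib
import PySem

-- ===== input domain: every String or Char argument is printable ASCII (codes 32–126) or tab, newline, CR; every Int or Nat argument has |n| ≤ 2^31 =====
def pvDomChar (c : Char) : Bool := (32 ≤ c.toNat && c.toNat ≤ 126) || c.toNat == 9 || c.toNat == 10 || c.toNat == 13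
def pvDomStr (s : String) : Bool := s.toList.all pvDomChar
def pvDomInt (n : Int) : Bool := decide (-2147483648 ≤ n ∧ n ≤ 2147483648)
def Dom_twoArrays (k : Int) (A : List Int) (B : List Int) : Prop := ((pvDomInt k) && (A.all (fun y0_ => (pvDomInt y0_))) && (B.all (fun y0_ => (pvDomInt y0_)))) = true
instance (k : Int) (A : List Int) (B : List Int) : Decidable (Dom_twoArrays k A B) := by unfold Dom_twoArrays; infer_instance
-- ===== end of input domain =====

-- B replaces A's stateful greedy matching loop by the classic sort-ascending/sort-descending
-- pairing check (objective: simpler); return values proved equal.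
-- A mutates only its local sorted copies, so there is no observable side effect to match.

-- ===== PORT A =====
-- inner 'for index in range(len(B))': scan B left to right; at the first b with
-- elem + b >= k, pop it (break, satisfiable=True); none = scanned all without a match.
def pyFindPair (k elem : Int) : List Int → Option (List Int)
  | [] => none
  | b :: bs => if k ≤ elem + b then some bs else (pyFindPair k elem bs).map (fun t => b :: t)

-- the 'while len(A)' loop; satisfiable is True at the top of every iteration (a False
-- immediately breaks), so the Bool state is carried implicitly: none + nonempty B = return False.
def twoArraysLoop (k : Int) : List Int → List Int → Bool
  | [], _ => true
  | elem :: rest, Bs =>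
    match pyFindPair k elem Bs with
    | some Bs' => twoArraysLoop k rest Bs'
    | none => if Bs.isEmpty then twoArraysLoop k rest Bs else false

def twoArrays (k : Int) (A : List Int) (B : List Int) : String :=
  if twoArraysLoop k (PySem.List.sorted A (fun x => x) false) (PySem.List.sorted B (fun x => x) false)
  then "YES" else "NO"

-- ===== PORT B =====
def twoArrays_alt (k : Int) (A : List Int) (B : List Int) : String :=
  let A2 := PySem.List.sorted A (fun x => x) false
  let B2 := PySem.List.sorted B (fun x => x) false
  if (A2.zip B2.reverse).all (fun p => decide (k ≤ p.1 + p.2)) then "YES" else "NO"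

-- ===== PRECONDITION & SPEC =====
def Spec_twoArrays (k : Int) (A : List Int) (B : List Int) (out : String) : Prop := out = twoArrays_alt k A B
instance (k : Int) (A : List Int) (B : List Int) (out : String) : Decidable (Spec_twoArrays k A B out) := by unfold Spec_twoArrays; infer_instance

-- ===== CLAIM (what is proved, stated in full; the proofs are below) =====
def Claim_equal_twoArrays : Prop := ∀ (k : Int) (A : List Int) (B : List Int), Dom_twoArrays k A B → Spec_twoArrays k A B (twoArrays k A B)

-- ===== LEMMAS AND PROOFS =====

theorem twoArraysLoop_nil_right (k : Int) (A : List Int) : twoArraysLoop k A [] = true := by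
  induction A with
  | nil => rfl
  | cons a rest ih => simp [twoArraysLoop, pyFindPair, ih]

theorem pyFindPair_none (k e : Int) :
    ∀ B : List Int, pyFindPair k e B = none → ∀ b ∈ B, e + b < k := by
  intro B
  induction B with
  | nil => simp
  | cons b bs ih =>
    intro h x hx
    by_cases hc : k ≤ e + b
    · simp [pyFindPair, hc] at h
    · simp [pyFindPair, hc, Option.map_eq_none_iff] at h
      rcases List.mem_cons.mp hx with rfl | hx
      · omega
      · exact ih h x hx

theorem pyFindPair_some (k e : Int) :
    ∀ B B' : List Int, pyFindPair k e B = some B' →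
      ∃ L m R, B = L ++ m :: R ∧ B' = L ++ R ∧ k ≤ e + m := by
  intro B
  induction B with
  | nil => intro B' h; simp [pyFindPair] at h
  | cons b bs ih =>
    intro B' h
    by_cases hc : k ≤ e + b
    · simp [pyFindPair, hc] at h
      exact ⟨[], b, bs, by simp, by simp [h], hc⟩
    · simp [pyFindPair, hc] at h
      rcases h with ⟨t, ht, hB'⟩
      rcases ih t ht with ⟨L, m, R, hbs, ht', hk⟩
      exact ⟨b :: L, m, R, by simp [hbs], by simp [← hB', ht'], hk⟩

-- Exchange argument: removing the matched m and the smallest a from the canonical pairing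
-- preserves feasibility of the all-pairs condition.
theorem exchange (k m : Int) :
    ∀ (Rd : List Int) (a : Int) (rest Ld : List Int),
      List.Pairwise (· ≤ ·) (a :: rest) → (∀ x ∈ Rd, m ≤ x) → k ≤ a + m →
      ((a :: rest).zip (Rd ++ m :: Ld)).all (fun p => decide (k ≤ p.1 + p.2)) =
        (rest.zip (Rd ++ Ld)).all (fun p => decide (k ≤ p.1 + p.2)) := by
  intro Rd
  induction Rd with
  | nil =>
    intro a rest Ld _ _ hk
    simp [List.zip_cons_cons, hk]
  | cons c Rd' ih =>
    intro a rest Ld hs hge hk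
    have hmc : m ≤ c := hge c (by simp)
    cases rest with
    | nil => simp [List.zip_cons_cons]; omega
    | cons r rest' =>
      have har : a ≤ r := List.rel_of_pairwise_cons hs (by simp)
      have hs' : List.Pairwise (· ≤ ·) (r :: rest') := hs.of_cons
      have hge' : ∀ x ∈ Rd', m ≤ x := fun x hx => hge x (by simp [hx])
      have hih := ih r rest' Ld hs' hge' (by omega)
      simp only [List.cons_append, List.zip_cons_cons, List.all_cons, hih]
      have h1 : (k ≤ a + c) := by omega
      have h2 : (k ≤ r + c) := by omega
      simp [h1, h2]

theorem loop_eq_canonical (k : Int) :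
    ∀ (A B : List Int), List.Pairwise (· ≤ ·) A → List.Pairwise (· ≤ ·) B →
      twoArraysLoop k A B = ((A.zip B.reverse).all (fun p => decide (k ≤ p.1 + p.2))) := by
  intro A
  induction A with
  | nil => intro B _ _; simp [twoArraysLoop]
  | cons a rest ih =>
    intro B hA hB
    cases hfp : pyFindPair k a B with
    | none =>
      cases B with
      | nil => simp [twoArraysLoop, pyFindPair, twoArraysLoop_nil_right]
      | cons b bs =>
        have hall := pyFindPair_none k a (b :: bs) hfp
        have hne : (b :: bs).reverse ≠ [] := by simp
        obtain ⟨y, ys, hy⟩ := List.exists_cons_of_ne_nil hne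
        have hymem : y ∈ b :: bs := by
          have hm : y ∈ (b :: bs).reverse := by simp [hy]
          exact List.mem_reverse.mp hm
        have : a + y < k := hall y hymem
        simp [twoArraysLoop, hfp, hy, List.zip_cons_cons]
        omega
    | some B' =>
      rcases pyFindPair_some k a B B' hfp with ⟨L, m, R, hBeq, hB', hk⟩
      have hRge : ∀ x ∈ R, m ≤ x := by
        have hsub : (m :: R).Sublist B := by
          rw [hBeq]; exact List.sublist_append_right L (m :: R)
        intro x hx
        exact List.rel_of_pairwise_cons (hB.sublist hsub) hx
      have hB'sorted : List.Pairwise (· ≤ ·) B' := by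
        have hsub : B'.Sublist B := by
          rw [hBeq, hB']
          exact List.Sublist.append (List.Sublist.refl L) (List.sublist_cons_self m R)
        exact hB.sublist hsub
      have hrest : List.Pairwise (· ≤ ·) rest := hA.of_cons
      have hih := ih B' hrest hB'sorted
      have hBrev : B.reverse = R.reverse ++ m :: L.reverse := by
        rw [hBeq]; simp
      have hB'rev : B'.reverse = R.reverse ++ L.reverse := by
        rw [hB']; simp
      have hRrev : ∀ x ∈ R.reverse, m ≤ x := by
        intro x hx; exact hRge x (by simpa using hx)
      have hx := exchange k m R.reverse a rest L.reverse hA hRrev hk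
      simp only [twoArraysLoop, hfp, hih, hBrev, hB'rev, hx]

-- ===== VERDICT (by name: the statement is the Claim_ definition above) =====
theorem twoArrays_spec : Claim_equal_twoArrays := by
  intro k A B _
  unfold Spec_twoArrays twoArrays twoArrays_alt
  have hA : List.Pairwise (· ≤ ·) (PySem.List.sorted A (fun x => x) false) :=
    PySem.List.sorted_pairwise A (fun x => x)
  have hB : List.Pairwise (· ≤ ·) (PySem.List.sorted B (fun x => x) false) :=
    PySem.List.sorted_pairwise B (fun x => x)
  rw [loop_eq_canonical k _ _ hA hB]
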